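-- pv_equiv track=rewrite | github.com/utkarsh-kashyap/TestDataService | src/utils/sql_utils.py | _strip_string_literals
-- ===== SOURCE A (Python) =====
-- def _strip_string_literals(sql: str) -> str:
--     out = []
--     i = 0
--     in_quote = False
--     L = len(sql)
--     while i < L:
--         ch = sql[i]
--         if not in_quote:
--             if ch == "'":
--                 in_quote = True
--                 out.append("''")
--                 i += 1
--             else:
--                 out.append(ch)
--                 i += 1
--         else:
--             if ch == "'":
--                 if i + 1 < L and sql[i + 1] == "'":
--                     i += 2
--                 else:
--                     in_quote = False
--                     out.append("''")
--                     i += 1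
--             else:
--                 i += 1
--     return "".join(out)
-- ===== SOURCE B (Python) =====
-- def _strip_string_literals(sql: str) -> str:
--     parts = sql.split("'")
--     n = len(parts)
--     out = [parts[0]]
--     k = 1
--     while k < n:
--         out.append("''")                # opening quote of a literal
--         while k + 1 < n and parts[k + 1] == "" and k + 2 < n:
--             k += 2                      # a doubled '' inside the literal
--         if k + 1 < n:
--             out.append("''")            # closing quote
--             out.append(parts[k + 1])    # text after the literal
--             k += 2
--         else:
--             k = n                       # unterminated literal: rest dropped
--     return "".join(out)
-- ===== Notes on version B (the rewrite author's own statement) =====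
-- stated objective: faster
-- what changed: B splits the SQL once on the quote character and walks the list of fragments (pairing doubled quotes by looking at empty fragments), instead of A's per-character state-machine scan with index lookahead.
import Mathlib
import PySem

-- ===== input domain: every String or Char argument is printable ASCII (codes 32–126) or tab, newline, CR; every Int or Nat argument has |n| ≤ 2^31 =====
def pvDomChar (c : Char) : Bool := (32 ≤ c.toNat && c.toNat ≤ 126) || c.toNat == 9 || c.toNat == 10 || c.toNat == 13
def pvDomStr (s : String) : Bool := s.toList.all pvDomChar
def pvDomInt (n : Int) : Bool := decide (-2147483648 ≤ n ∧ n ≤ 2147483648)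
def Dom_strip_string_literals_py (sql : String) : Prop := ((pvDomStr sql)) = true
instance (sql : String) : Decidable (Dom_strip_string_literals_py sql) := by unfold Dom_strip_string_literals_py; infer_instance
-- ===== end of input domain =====

-- B replaces A's per-character state machine by one split on the quote character
-- followed by a walk over the fragment list (objective: faster by a constant factor).

-- ===== PORT A =====
-- A's while loop over characters with the in_quote flag and the i+1 lookahead.
def goA (inq : Bool) (cs : List Char) : List Char :=
  match inq, cs with
  | false, [] => []
  | false, c :: rest =>
    if c = '\'' then '\'' :: '\'' :: goA true rest else c :: goA false rest
  | true, [] => []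
  | true, c :: rest =>
    if c = '\'' then
      match rest with
      | r :: rest' => if r = '\'' then goA true rest' else '\'' :: '\'' :: goA false (r :: rest')
      | [] => '\'' :: '\'' :: goA false []
    else goA true rest
termination_by cs.length
decreasing_by all_goals simp

def strip_string_literals_py (sql : String) : String :=
  String.ofList (goA false sql.toList)

-- ===== PORT B =====
-- walk of the fragments that follow an opening quote, inside a literal:
-- a following empty fragment (with more to come) is a doubled '' and is skipped,
-- otherwise the quote closes the literal and the next fragment is plain text.
mutual
def altBody : List (List Char) → List Char
  | [] => []
  | [_] => []
  | _ :: p2 :: ps =>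
    if p2 = [] ∧ ps ≠ [] then altBody ps
    else '\'' :: '\'' :: (p2 ++ altGo ps)
termination_by ps => 2 * ps.length
decreasing_by all_goals (simp; try omega)

-- fragments remaining with the scan outside any literal: each boundary opens a literal
def altGo : List (List Char) → List Char
  | [] => []
  | p :: ps => '\'' :: '\'' :: altBody (p :: ps)
termination_by ps => 2 * ps.length + 1
decreasing_by simp
end

def strip_string_literals_py_alt (sql : String) : String :=
  match PySem.Chars.splitOn sql.toList ['\''] with
  | [] => ""
  | p :: ps => String.ofList (p ++ altGo ps)

-- ===== PRECONDITION & SPEC =====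
def Spec_strip_string_literals_py (sql : String) (out : String) : Prop := out = strip_string_literals_py_alt sql
instance (sql : String) (out : String) : Decidable (Spec_strip_string_literals_py sql out) := by unfold Spec_strip_string_literals_py; infer_instance

-- ===== CLAIM (what is proved, stated in full; the proofs are below) =====
def Claim_equal_strip_string_literals_py : Prop := ∀ (sql : String), Dom_strip_string_literals_py sql → Spec_strip_string_literals_py sql (strip_string_literals_py sql)

-- ===== LEMMAS AND PROOFS =====

-- reference splitter: split on a single quote character, simple structural recursion
def mySplit : List Char → List (List Char)
  | [] => [[]]
  | c :: cs =>
    if c = '\'' then [] :: mySplit cs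
    else
      match mySplit cs with
      | p :: ps => (c :: p) :: ps
      | [] => [[c]]

lemma mySplit_ne_nil (cs : List Char) : mySplit cs ≠ [] := by
  cases cs with
  | nil => simp [mySplit]
  | cons c cs =>
    simp only [mySplit]
    split
    · simp
    · split <;> simp

def prependRev (cur : List Char) : List (List Char) → List (List Char)
  | [] => []
  | p :: ps => (cur.reverse ++ p) :: ps

lemma splitOn_go_eq (fuel : Nat) (cs cur : List Char) (acc : List (List Char))
    (h : cs.length < fuel) :
    PySem.Chars.splitOn.go ['\''] fuel cs cur acc =
      acc.reverse ++ prependRev cur (mySplit cs) := by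
  induction fuel generalizing cs cur acc with
  | zero => omega
  | succ fuel ih =>
    cases cs with
    | nil =>
      simp [PySem.Chars.splitOn.go, mySplit, prependRev]
    | cons c rest =>
      rcases hsp : mySplit rest with _ | ⟨p, ps⟩
      · exact absurd hsp (mySplit_ne_nil _)
      by_cases hc : c = '\''
      · subst hc
        rw [PySem.Chars.splitOn.go]
        rw [if_pos (by simp)]
        simp only [List.length_cons, List.length_nil, List.drop_succ_cons, List.drop_zero]
        rw [ih rest [] _ (by simpa using Nat.lt_of_succ_lt_succ (by simpa using h))]
        simp [mySplit, prependRev, hsp]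
      · rw [PySem.Chars.splitOn.go]
        rw [if_neg (by simp [List.isPrefixOf_iff_prefix, List.prefix_cons_iff]; exact fun h => hc h.symm)]
        rw [ih rest (c :: cur) acc (by simpa using Nat.lt_of_succ_lt_succ (by simpa using h))]
        simp [mySplit, prependRev, hsp, hc]

lemma splitOn_eq (cs : List Char) :
    PySem.Chars.splitOn cs ['\''] = mySplit cs := by
  rw [PySem.Chars.splitOn, splitOn_go_eq _ _ _ _ (by omega)]
  rcases hsp : mySplit cs with _ | ⟨p, ps⟩
  · exact absurd hsp (mySplit_ne_nil _)
  · simp [prependRev]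

lemma altBody_head_irrel (x y : List Char) (t : List (List Char)) :
    altBody (x :: t) = altBody (y :: t) := by
  cases t <;> simp [altBody]

lemma goA_nil (b : Bool) : goA b [] = [] := by cases b <;> rw [goA.eq_def]

lemma goA_false_cons (c : Char) (rest : List Char) :
    goA false (c :: rest) =
      if c = '\'' then '\'' :: '\'' :: goA true rest else c :: goA false rest := by
  rw [goA.eq_def]

lemma goA_true_cons (c : Char) (rest : List Char) :
    goA true (c :: rest) =
      if c = '\'' then
        match rest with
        | r :: rest' => if r = '\'' then goA true rest' else '\'' :: '\'' :: goA false (r :: rest')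
        | [] => '\'' :: '\'' :: goA false []
      else goA true rest := by
  rw [goA.eq_def]

lemma goA_eq_aux (n : Nat) : ∀ cs : List Char, cs.length ≤ n →
    (goA false cs =
      (match mySplit cs with
       | p :: ps => p ++ altGo ps
       | [] => [])) ∧
    goA true cs = altBody (mySplit cs) := by
  induction n with
  | zero =>
    intro cs hcs
    have h0 : cs = [] := by cases cs <;> simp_all
    subst h0
    simp [goA_nil, mySplit, altGo, altBody]
  | succ n ih =>
    intro cs hcs
    cases cs with
    | nil => simp [goA_nil, mySplit, altGo, altBody]
    | cons c rest =>
      rcases hsp : mySplit rest with _ | ⟨p, ps⟩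
      · exact absurd hsp (mySplit_ne_nil _)
      have hrest : rest.length ≤ n := by simpa using Nat.le_of_succ_le_succ (by simpa using hcs)
      by_cases hc : c = '\''
      · subst hc
        constructor
        · -- outside: the quote opens a literal
          rw [goA_false_cons, if_pos rfl, (ih rest hrest).2, hsp]
          have hS : mySplit ('\'' :: rest) = [] :: p :: ps := by simp [mySplit, hsp]
          rw [hS]
          simp [altGo]
        · -- inside: the lookahead at the next character
          rw [goA_true_cons, if_pos rfl]
          cases rest with
          | nil => simp [goA_nil, mySplit, altBody, altGo]
          | cons r rest' =>
            rcases hsp' : mySplit rest' with _ | ⟨p', ps'⟩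
            · exact absurd hsp' (mySplit_ne_nil _)
            have hrest' : rest'.length ≤ n := by simp at hrest; omega
            by_cases hr : r = '\''
            · subst hr
              have hred : (match '\'' :: rest' with
                  | r :: rest' => if r = '\'' then goA true rest' else '\'' :: '\'' :: goA false (r :: rest')
                  | [] => '\'' :: '\'' :: goA false []) = goA true rest' := by simp
              rw [hred, (ih rest' hrest').2, hsp']
              have hS : mySplit ('\'' :: '\'' :: rest') = [] :: [] :: p' :: ps' := by
                simp [mySplit, hsp']
              rw [hS]
              simp [altBody]
            · have hred : (match r :: rest' with
                  | r :: rest' => if r = '\'' then goA true rest' else '\'' :: '\'' :: goA false (r :: rest')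
                  | [] => '\'' :: '\'' :: goA false []) =
                  if r = '\'' then goA true rest' else '\'' :: '\'' :: goA false (r :: rest') := rfl
              rw [hred, if_neg hr, (ih (r :: rest') hrest).1]
              have hsp2 : mySplit (r :: rest') = (r :: p') :: ps' := by
                simp [mySplit, hr, hsp']
              rw [hsp2]
              have hS : mySplit ('\'' :: r :: rest') = [] :: (r :: p') :: ps' := by
                simp [mySplit, hr, hsp']
              rw [hS]
              simp [altBody]
      · constructor
        · rw [goA_false_cons, if_neg hc, (ih rest hrest).1, hsp]
          have hS : mySplit (c :: rest) = (c :: p) :: ps := by simp [mySplit, hc, hsp]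
          rw [hS]
          simp
        · rw [goA_true_cons, if_neg hc, (ih rest hrest).2, hsp]
          have hS : mySplit (c :: rest) = (c :: p) :: ps := by simp [mySplit, hc, hsp]
          rw [hS]
          exact altBody_head_irrel p (c :: p) ps

lemma goA_eq (cs : List Char) :
    (goA false cs =
      (match mySplit cs with
       | p :: ps => p ++ altGo ps
       | [] => [])) ∧
    goA true cs = altBody (mySplit cs) :=
  goA_eq_aux cs.length cs (le_refl _)

-- ===== VERDICT (by name: the statement is the Claim_ definition above) =====
theorem strip_string_literals_py_spec : Claim_equal_strip_string_literals_py := by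
  intro sql _
  unfold Spec_strip_string_literals_py strip_string_literals_py strip_string_literals_py_alt
  rw [splitOn_eq]
  rcases h : mySplit sql.toList with _ | ⟨p, ps⟩
  · exact absurd h (mySplit_ne_nil _)
  · have := (goA_eq sql.toList).1
    rw [h] at this
    simp [this]
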